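-- pv_equiv track=rewrite | github.com/ainglese-dev/cfg-drift | tests/common/config_utils.py | extract_banner
-- ===== SOURCE A (Python) =====
-- def extract_banner(lines):
--     """Extract full banner block: header + content + terminator."""
--     for i, line in enumerate(lines):
--         stripped = line.strip()
--         if not stripped.startswith('banner '):
--             continue
--
--         parts = stripped.split(None, 3)
--         if len(parts) < 3:
--             continue
--
--         delimiter = parts[2]
--         banner_lines = [line]
--
--         # Handle inline banners: "banner motd ^Ccontent^C"
--         if len(parts) >= 4:
--             content = parts[3]
--             if content.endswith(delimiter):
--                 return [line, content[:-len(delimiter)], delimiter]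
--             banner_lines.append(content)
--
--         # Collect lines until delimiter
--         for j in range(i + 1, len(lines)):
--             if lines[j].strip() == delimiter:
--                 banner_lines.append(lines[j].strip())
--                 return banner_lines
--             banner_lines.append(lines[j])
--
--         return banner_lines  # EOF reached
--
--     return None
-- ===== SOURCE B (Python) =====
-- def extract_banner(lines):
--     """Extract full banner block: header + content + terminator."""
--     delimiter = None
--     banner_lines = None
--     for line in lines:
--         if delimiter is None:
--             # SEARCHING for a valid banner header
--             stripped = line.strip()
--             if not stripped.startswith('banner '):
--                 continue
--             parts = stripped.split(None, 3)
--             if len(parts) < 3: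
--                 continue
--             delimiter = parts[2]
--             banner_lines = [line]
--             if len(parts) >= 4:
--                 content = parts[3]
--                 if content.endswith(delimiter):
--                     return [line, content[:-len(delimiter)], delimiter]
--                 banner_lines.append(content)
--         else:
--             # COLLECTING until the terminator
--             if line.strip() == delimiter:
--                 banner_lines.append(line.strip())
--                 return banner_lines
--             banner_lines.append(line)
--     return banner_lines
-- ===== Notes on version B (the rewrite author's own statement) =====
-- stated objective: alternative
-- what changed: Replaced the nested enumerate-loop with an inner index loop by a single flat pass over the lines driven by a delimiter state flag (None = searching, set = collecting).
import Mathlib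
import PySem

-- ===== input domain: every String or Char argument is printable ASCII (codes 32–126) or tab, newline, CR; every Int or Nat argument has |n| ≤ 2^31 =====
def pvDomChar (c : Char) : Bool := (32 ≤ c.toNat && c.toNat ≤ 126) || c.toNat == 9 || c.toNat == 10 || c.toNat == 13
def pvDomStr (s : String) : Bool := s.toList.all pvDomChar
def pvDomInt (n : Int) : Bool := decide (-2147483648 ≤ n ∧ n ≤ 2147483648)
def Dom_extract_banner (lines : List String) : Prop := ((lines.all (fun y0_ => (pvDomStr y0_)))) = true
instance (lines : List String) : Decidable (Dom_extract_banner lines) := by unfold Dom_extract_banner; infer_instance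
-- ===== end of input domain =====

-- B replaces A's nested loops (outer scan + inner collect loop over an index range)
-- by one flat pass with a delimiter state flag; return value is identical.

-- ===== PORT A =====
-- A's inner loop 'for j in range(i+1, len(lines))' walks exactly the suffix after line i.
def pvACollect (delimiter : String) (banner_lines : List String) : List String → List String
  | [] => banner_lines  -- EOF reached
  | l :: rest =>
    if PySem.Str.strip l == delimiter then banner_lines ++ [PySem.Str.strip l]
    else pvACollect delimiter (banner_lines ++ [l]) rest

def pvAGo : List String → Option (List String)
  | [] => none
  | line :: rest =>
    let stripped := PySem.Str.strip line
    if PySem.Str.startswith stripped "banner " = false then pvAGo rest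
    else
      let parts := PySem.Str.split₀Max stripped 3
      if parts.length < 3 then pvAGo rest
      else
        let delimiter := parts.getD 2 ""
        let banner_lines := [line]
        if 4 ≤ parts.length then
          let content := parts.getD 3 ""
          if PySem.Str.endswith content delimiter then
            some [line, PySem.Str.slice content none (some (-(PySem.Str.len delimiter))), delimiter]
          else some (pvACollect delimiter (banner_lines ++ [content]) rest)
        else some (pvACollect delimiter banner_lines rest)

def extract_banner (lines : List String) : Option (List String) := pvAGo lines

-- ===== PORT B =====
-- state: none = SEARCHING; some (delimiter, banner_lines) = COLLECTING
def pvBGo : Option (String × List String) → List String → Option (List String)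
  | none, [] => none
  | some (_, banner_lines), [] => some banner_lines
  | some (delimiter, banner_lines), line :: rest =>
    if PySem.Str.strip line == delimiter then some (banner_lines ++ [PySem.Str.strip line])
    else pvBGo (some (delimiter, banner_lines ++ [line])) rest
  | none, line :: rest =>
    let stripped := PySem.Str.strip line
    if PySem.Str.startswith stripped "banner " = false then pvBGo none rest
    else
      let parts := PySem.Str.split₀Max stripped 3
      if parts.length < 3 then pvBGo none rest
      else
        let delimiter := parts.getD 2 ""
        if 4 ≤ parts.length then
          let content := parts.getD 3 ""
          if PySem.Str.endswith content delimiter then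
            some [line, PySem.Str.slice content none (some (-(PySem.Str.len delimiter))), delimiter]
          else pvBGo (some (delimiter, [line, content])) rest
        else pvBGo (some (delimiter, [line])) rest

def extract_banner_alt (lines : List String) : Option (List String) := pvBGo none lines

-- ===== PRECONDITION & SPEC =====
def Spec_extract_banner (lines : List String) (out : Option (List String)) : Prop := out = extract_banner_alt lines
instance (lines : List String) (out : Option (List String)) : Decidable (Spec_extract_banner lines out) := by unfold Spec_extract_banner; infer_instance

-- ===== CLAIM (what is proved, stated in full; the proofs are below) =====
def Claim_equal_extract_banner : Prop := ∀ (lines : List String), Dom_extract_banner lines → Spec_extract_banner lines (extract_banner lines)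

-- ===== LEMMAS AND PROOFS =====
theorem pvBGo_collect (rest : List String) : ∀ (delimiter : String) (acc : List String),
    pvBGo (some (delimiter, acc)) rest = some (pvACollect delimiter acc rest) := by
  induction rest with
  | nil => intro d acc; rfl
  | cons l t ih =>
    intro d acc
    simp only [pvBGo, pvACollect]
    split_ifs with h
    · rfl
    · exact ih d (acc ++ [l])

theorem pvGo_eq (lines : List String) : pvAGo lines = pvBGo none lines := by
  induction lines with
  | nil => rfl
  | cons line rest ih =>
    simp only [pvAGo, pvBGo]
    split_ifs with h1 h2 h3 h4
    · exact ih
    · exact ih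
    · rfl
    · rw [pvBGo_collect]; rfl
    · rw [pvBGo_collect]

-- ===== VERDICT (by name: the statement is the Claim_ definition above) =====
theorem extract_banner_spec : Claim_equal_extract_banner := by
  intro lines _
  unfold Spec_extract_banner extract_banner extract_banner_alt
  exact pvGo_eq lines
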